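-- pv_equiv track=rewrite | github.com/yuri-kilochek/pytemplate | template/_parse.py | adjust_empty_depth
-- ===== SOURCE A (Python) =====
-- def adjust_empty_depth(lines):
--     base_depth = None
--
--     empty_count = 0
--     for depth, text in lines:
--         if text == '':
--             empty_count += 1
--             continue
--
--         if base_depth is None:
--             base_depth = depth
--
--         while empty_count > 0:
--             yield depth, ''
--             empty_count -= 1
--
--         yield depth, text
--
--     while empty_count > 0:
--         yield base_depth, ''
--         empty_count -= 1
-- ===== SOURCE B (Python) =====
-- def adjust_empty_depth(lines):
--     lines = list(lines)
--     base_depth = None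
--     for depth, text in lines:
--         if text != '':
--             base_depth = depth
--             break
--     depths = [None] * len(lines)
--     next_depth = base_depth
--     for i in range(len(lines) - 1, -1, -1):
--         depth, text = lines[i]
--         if text != '':
--             next_depth = depth
--         depths[i] = next_depth
--     for (depth, text), d in zip(lines, depths):
--         yield d, text
-- ===== Notes on version B (the rewrite author's own statement) =====
-- stated objective: alternative
-- what changed: Replaces A's forward generator that buffers a pending empty-line counter and flushes it at each non-empty line with a materialize-then-reverse-pass algorithm: one backward sweep assigns every line its depth (an empty line gets the following non-empty line's depth, trailing empties the base depth), then a forward sweep yields the pairs.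
-- outside the precondition, e.g. on adjust_empty_depth([(3, '')]): A returns [(None, '')], B returns [(None, '')]
import Mathlib
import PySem

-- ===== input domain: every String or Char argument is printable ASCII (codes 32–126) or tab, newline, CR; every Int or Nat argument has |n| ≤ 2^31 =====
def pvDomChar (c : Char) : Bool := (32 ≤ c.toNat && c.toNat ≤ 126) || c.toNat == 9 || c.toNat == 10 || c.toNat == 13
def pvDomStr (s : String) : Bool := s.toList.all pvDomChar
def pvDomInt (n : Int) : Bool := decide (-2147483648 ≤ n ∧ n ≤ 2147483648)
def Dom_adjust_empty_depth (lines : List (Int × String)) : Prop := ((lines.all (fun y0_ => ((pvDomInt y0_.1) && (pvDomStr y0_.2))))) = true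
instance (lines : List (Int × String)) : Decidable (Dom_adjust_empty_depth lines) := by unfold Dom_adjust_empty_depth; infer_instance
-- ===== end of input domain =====

-- B replaces A's forward generator with a pending-empty counter by a reverse pass that
-- assigns each empty line the following non-empty line's depth; alternative decomposition,
-- same cost. Equivalence of the return sequence is proved on Pre_ (A is a generator;
-- outputs compare as the list of yielded pairs).

-- ===== PORT A =====
-- the generator's for-loop, carrying base_depth and empty_count; the inner
-- 'while empty_count > 0: yield' loops become List.replicate of the same pairs.
-- On the excluded all-empty inputs Python yields (None, ''); the port writes depth 0 there.
def aLoop : List (Int × String) → Option Int → Nat → List (Int × String)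
  | [], base, ec => List.replicate ec (base.getD 0, "")
  | (d, t) :: rest, base, ec =>
    if t = "" then aLoop rest base (ec + 1)
    else
      let base' := if base = none then some d else base
      List.replicate ec (d, "") ++ (d, t) :: aLoop rest base' 0

def adjust_empty_depth (lines : List (Int × String)) : List (Int × String) :=
  aLoop lines none 0

-- ===== PORT B =====
-- first loop of Source B: base_depth = first non-empty line's depth (break), else None
def bBase : List (Int × String) → Option Int
  | [] => none
  | (d, t) :: rest => if t ≠ "" then some d else bBase rest

-- reverse index loop of Source B as a foldr carrying next_depth and the built suffix;
-- on the excluded all-empty inputs Python records None, the port writes depth 0.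
def bRev (p : Int × String) (st : Option Int × List (Int × String)) :
    Option Int × List (Int × String) :=
  let nd := if p.2 ≠ "" then some p.1 else st.1
  (nd, (nd.getD 0, p.2) :: st.2)

def adjust_empty_depth_alt (lines : List (Int × String)) : List (Int × String) :=
  (lines.foldr bRev (bBase lines, [])).2

-- ===== PRECONDITION & SPEC =====
-- Pre_ excludes nonempty inputs whose lines are all empty: there Python A yields
-- (None, ''), which is not an (int, str) pair (and Python B does the same).
def Pre_adjust_empty_depth (lines : List (Int × String)) : Prop :=
  lines = [] ∨ lines.any (fun p => p.2 ≠ "") = true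
instance (lines : List (Int × String)) : Decidable (Pre_adjust_empty_depth lines) := by
  unfold Pre_adjust_empty_depth; infer_instance

def pvWitness_adjust_empty_depth : (List (Int × String)) := [(1, "a"), (2, "")]

def Spec_adjust_empty_depth (lines : List (Int × String)) (out : List (Int × String)) : Prop := out = adjust_empty_depth_alt lines
instance (lines : List (Int × String)) (out : List (Int × String)) : Decidable (Spec_adjust_empty_depth lines out) := by unfold Spec_adjust_empty_depth; infer_instance

-- ===== CLAIM (what is proved, stated in full; the proofs are below) =====
def Claim_equal_adjust_empty_depth : Prop := ∀ (lines : List (Int × String)), Dom_adjust_empty_depth lines → Pre_adjust_empty_depth lines → Spec_adjust_empty_depth lines (adjust_empty_depth lines)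

-- ===== LEMMAS AND PROOFS =====

-- first of two options (proof-side helper)
def ofirst (a b : Option Int) : Option Int :=
  match a with
  | some x => some x
  | none => b

theorem ofirst_none (b : Option Int) : ofirst none b = b := rfl

-- the next_depth carried by the foldr is the first non-empty depth of the suffix,
-- falling back to the initial value
theorem foldr_fst (ls : List (Int × String)) (nd0 : Option Int) :
    (ls.foldr bRev (nd0, [])).1 = ofirst (bBase ls) nd0 := by
  induction ls with
  | nil => rfl
  | cons p rest ih =>
    simp only [List.foldr_cons, bRev, bBase]
    by_cases h : p.2 = ""
    · simp [h, ih, ofirst]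
    · simp [h, ofirst]

-- main invariant: continuing A's loop from state (base, ec) over the suffix ls produces
-- ec copies of the upcoming depth followed by B's reverse-pass output on ls
theorem aLoop_eq (ls : List (Int × String)) (base : Option Int) (ec : Nat) :
    aLoop ls base ec =
      List.replicate ec ((ofirst (bBase ls) base).getD 0, "") ++
        (ls.foldr bRev (ofirst base (bBase ls), [])).2 := by
  induction ls generalizing base ec with
  | nil => cases base <;> simp [aLoop, bBase, ofirst]
  | cons p rest ih =>
    obtain ⟨d, t⟩ := p
    by_cases h : t = ""
    · subst h
      have hstep : aLoop ((d, "") :: rest) base ec = aLoop rest base (ec + 1) := by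
        simp [aLoop]
      rw [hstep, ih, List.replicate_succ']
      simp only [List.foldr_cons, bRev, foldr_fst]
      cases hb : bBase rest <;> cases base <;>
        simp [ofirst, bBase, hb, List.append_assoc]
    · have hstep : aLoop ((d, t) :: rest) base ec
          = List.replicate ec (d, "") ++
              (d, t) :: aLoop rest (if base = none then some d else base) 0 := by
        simp [aLoop, h]
      have hb' : (if base = none then some d else base) = ofirst base (some d) := by
        cases base <;> rfl
      rw [hstep, hb', ih]
      simp only [List.foldr_cons, bRev]
      cases bBase rest <;> cases base <;> simp [ofirst, bBase, h]

-- ===== VERDICT (by name: the statement is the Claim_ definition above) =====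
theorem adjust_empty_depth_spec : Claim_equal_adjust_empty_depth := by
  intro lines _ _
  show adjust_empty_depth lines = adjust_empty_depth_alt lines
  unfold adjust_empty_depth adjust_empty_depth_alt
  rw [aLoop_eq]
  simp [ofirst_none]
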